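-- pv_equiv track=rewrite | github.com/DandanLLab/wanxiang-scroll | scripts/format_helper.py | add_newlines_after_imports
-- ===== SOURCE A (Python) =====
-- def add_newlines_after_imports(content):
--     """在 import 语句后添加空行"""
--     lines = content.split('\n')
--     new_lines = []
--     prev_was_import = False
--
--     for line in lines:
--         stripped = line.strip()
--         is_import = stripped.startswith('import ') or stripped.startswith('from ')
--
--         if prev_was_import and not is_import and stripped and not stripped.startswith('#'):
--             new_lines.append('')
--
--         new_lines.append(line)
--         prev_was_import = is_import
--
--     return '\n'.join(new_lines)
-- ===== SOURCE B (Python) =====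
-- def _is_import(line):
--     s = line.strip()
--     return s.startswith('import ') or s.startswith('from ')
--
--
-- def _breaks(prev, cur):
--     s = cur.strip()
--     return _is_import(prev) and not _is_import(cur) and bool(s) and not s.startswith('#')
--
--
-- def _split_blocks(lines):
--     """Recursively segment lines into blocks, cutting between an import line
--     and a following non-import, non-blank, non-comment line."""
--     if len(lines) <= 1:
--         return [lines]
--     rest = _split_blocks(lines[1:])
--     if _breaks(lines[0], lines[1]):
--         return [[lines[0]]] + rest
--     return [[lines[0]] + rest[0]] + rest[1:]
--
--
-- def add_newlines_after_imports(content):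
--     """在 import 语句后添加空行"""
--     blocks = _split_blocks(content.split('\n'))
--     return '\n\n'.join('\n'.join(b) for b in blocks)
-- ===== Notes on version B (the rewrite author's own statement) =====
-- stated objective: alternative
-- what changed: B recursively segments the line list into blocks (cutting between an import line and a following code line) and joins the blocks with a double-newline separator, instead of A's single pass with a prev_was_import flag that interleaves blank lines into one flat list.
import Mathlib
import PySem

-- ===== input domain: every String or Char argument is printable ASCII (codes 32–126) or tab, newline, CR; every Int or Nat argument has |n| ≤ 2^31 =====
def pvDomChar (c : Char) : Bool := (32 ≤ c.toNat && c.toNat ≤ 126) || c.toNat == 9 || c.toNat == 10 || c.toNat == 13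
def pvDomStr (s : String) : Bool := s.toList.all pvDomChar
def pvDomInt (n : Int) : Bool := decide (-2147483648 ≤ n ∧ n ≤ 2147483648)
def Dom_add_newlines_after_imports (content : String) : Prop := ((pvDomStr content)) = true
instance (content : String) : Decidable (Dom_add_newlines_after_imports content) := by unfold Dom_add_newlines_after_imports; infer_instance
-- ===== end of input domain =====

-- B segments the line list into blocks (recursive splitter) and joins the blocks with a
-- double-newline separator, instead of A's flat single pass with a prev_was_import flag;
-- alternative decomposition, same cost.

-- ===== PORT A =====
-- one iteration of A's for-loop: state = (new_lines, prev_was_import)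
def pvStepA (st : List String × Bool) (line : String) : List String × Bool :=
  let stripped := PySem.Str.strip line
  let is_import := PySem.Str.startswith stripped "import " || PySem.Str.startswith stripped "from "
  let new_lines :=
    if st.2 && !is_import && !(stripped == "") && !(PySem.Str.startswith stripped "#") then
      st.1 ++ [""]
    else st.1
  (new_lines ++ [line], is_import)

def add_newlines_after_imports (content : String) : String :=
  match PySem.Str.split? content "\n" with
  | none => ""   -- unreachable: separator "\n" is nonempty
  | some lines => PySem.Str.join "\n" ((lines.foldl pvStepA ([], false)).1)

-- ===== PORT B =====
def pvIsImport (line : String) : Bool :=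
  PySem.Str.startswith (PySem.Str.strip line) "import "
    || PySem.Str.startswith (PySem.Str.strip line) "from "

def pvBreaks (prev cur : String) : Bool :=
  pvIsImport prev && !pvIsImport cur && !(PySem.Str.strip cur == "")
    && !(PySem.Str.startswith (PySem.Str.strip cur) "#")

-- _split_blocks: len(lines) <= 1 → [lines]; else recurse on lines[1:]
def pvSplitBlocks : List String → List (List String)
  | [] => [[]]
  | [l] => [[l]]
  | a :: b :: rest =>
    let r := pvSplitBlocks (b :: rest)
    if pvBreaks a b then [a] :: r
    else
      match r with
      | [] => [[a]]            -- unreachable: _split_blocks always returns a nonempty list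
      | h :: t => (a :: h) :: t

def add_newlines_after_imports_alt (content : String) : String :=
  match PySem.Str.split? content "\n" with
  | none => ""   -- unreachable: separator "\n" is nonempty
  | some lines =>
    PySem.Str.join "\n\n" ((pvSplitBlocks lines).map (PySem.Str.join "\n"))

-- ===== PRECONDITION & SPEC =====
def Spec_add_newlines_after_imports (content : String) (out : String) : Prop := out = add_newlines_after_imports_alt content
instance (content : String) (out : String) : Decidable (Spec_add_newlines_after_imports content out) := by unfold Spec_add_newlines_after_imports; infer_instance

-- ===== CLAIM (what is proved, stated in full; the proofs are below) =====
def Claim_equal_add_newlines_after_imports : Prop := ∀ (content : String), Dom_add_newlines_after_imports content → Spec_add_newlines_after_imports content (add_newlines_after_imports content)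

-- ===== LEMMAS AND PROOFS =====

-- A's new_lines, written structurally: blank-line insertions driven by adjacent pairs
def pvTailIns : String → List String → List String
  | _, [] => []
  | a, b :: r => (if pvBreaks a b then ["", b] else [b]) ++ pvTailIns b r

theorem pv_foldA (r : List String) : ∀ (x : String) (acc : List String),
    (r.foldl pvStepA (acc, pvIsImport x)).1 = acc ++ pvTailIns x r := by
  induction r with
  | nil => intro x acc; simp [pvTailIns]
  | cons b r' ih =>
    intro x acc
    have hstep : pvStepA (acc, pvIsImport x) b
        = (acc ++ (if pvBreaks x b then ["", b] else [b]), pvIsImport b) := by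
      simp [pvStepA, pvBreaks, pvIsImport]
      split_ifs <;> simp_all
    rw [List.foldl_cons, hstep, ih b]
    simp [pvTailIns]

-- _split_blocks on a nonempty list: the first block starts with the first line
theorem pv_shape (r : List String) : ∀ (b : String),
    ∃ s t, pvSplitBlocks (b :: r) = (b :: s) :: t := by
  induction r with
  | nil => intro b; exact ⟨[], [], rfl⟩
  | cons c r'' ih =>
    intro b
    obtain ⟨s, t, hst⟩ := ih c
    by_cases h : pvBreaks b c
    · exact ⟨[], pvSplitBlocks (c :: r''), by simp [pvSplitBlocks, h]⟩
    · exact ⟨c :: s, t, by simp [pvSplitBlocks, h, hst]⟩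

theorem pv_join_head {sep x y : List Char} {t : List (List Char)} :
    PySem.Chars.join sep ((x ++ y) :: t) = x ++ PySem.Chars.join sep (y :: t) := by
  cases t with
  | nil => simp [PySem.Chars.join_singleton]
  | cons u t' => simp [PySem.Chars.join_cons_cons]

-- the key identity: A's flat interleaved list joined by "\n" = B's blocks joined by "\n\n"
theorem pv_join_eq (r : List String) : ∀ (a : String),
    PySem.Chars.join ['\n'] ((a :: pvTailIns a r).map String.toList)
      = PySem.Chars.join ['\n', '\n']
          (((pvSplitBlocks (a :: r)).map (PySem.Str.join "\n")).map String.toList) := by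
  induction r with
  | nil =>
    intro a
    simp only [pvTailIns, pvSplitBlocks, List.map_cons, List.map_nil]
    rw [PySem.Chars.join_singleton, PySem.Chars.join_singleton, PySem.Str.toList_join]
    simp only [List.map_cons, List.map_nil]
    rw [PySem.Chars.join_singleton]
  | cons b r' ih =>
    intro a
    obtain ⟨s, t, hst⟩ := pv_shape r' b
    have hemp : ("" : String).toList = [] := rfl
    have hib := ih b
    rw [hst] at hib
    simp only [List.map_cons] at hib
    by_cases h : pvBreaks a b
    · have hrhs : pvSplitBlocks (a :: b :: r') = [a] :: pvSplitBlocks (b :: r') := by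
        simp [pvSplitBlocks, h]
      rw [hrhs, hst]
      simp only [pvTailIns, h, if_true, List.cons_append, List.nil_append, List.map_cons]
      rw [PySem.Chars.join_cons_cons, PySem.Chars.join_cons_cons,
        PySem.Chars.join_cons_cons, hib, hemp]
      have h1 : (PySem.Str.join "\n" [a]).toList = a.toList := by
        rw [PySem.Str.toList_join]
        simp only [List.map_cons, List.map_nil]
        rw [PySem.Chars.join_singleton]
      rw [h1]
      simp
    · have hrhs : pvSplitBlocks (a :: b :: r') = (a :: b :: s) :: t := by
        simp [pvSplitBlocks, h, hst]
      rw [hrhs]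
      have hhd : (PySem.Str.join "\n" (a :: b :: s)).toList
          = (a.toList ++ ['\n']) ++ (PySem.Str.join "\n" (b :: s)).toList := by
        rw [PySem.Str.toList_join, PySem.Str.toList_join]
        simp only [List.map_cons]
        rw [PySem.Chars.join_cons_cons]
        simp
      simp only [pvTailIns, h, Bool.false_eq_true, if_false, List.nil_append,
        List.cons_append, List.map_cons]
      rw [PySem.Chars.join_cons_cons, hhd, pv_join_head, hib]

-- ===== VERDICT (by name: the statement is the Claim_ definition above) =====
theorem add_newlines_after_imports_spec : Claim_equal_add_newlines_after_imports := by
  intro content _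
  unfold Spec_add_newlines_after_imports add_newlines_after_imports add_newlines_after_imports_alt
  cases hsp : PySem.Str.split? content "\n" with
  | none => rfl
  | some lines =>
    cases lines with
    | nil => rfl
    | cons first rest =>
      have h0 : pvStepA ([], false) first = ([first], pvIsImport first) := by
        simp [pvStepA, pvIsImport]
      simp only [List.foldl_cons, h0]
      rw [pv_foldA rest first [first]]
      have hkey := pv_join_eq rest first
      simp only [PySem.Str.join]
      exact congrArg String.ofList (by simpa using hkey)
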